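-- pv_equiv track=rewrite | github.com/neqt/Object-Oriented-Data-Structures | 2_Python2/item5.py | bon
-- ===== SOURCE A (Python) =====
-- def bon(w):
--     alphabet = 'abcdefghijklmnopqrstuvwxyz'
--     w = w.lower()
--     code = 0
--     i = 0
--
--     while i < len(w):
--         j = i + 1
--         while j < len(w) and w[i] == w[j]:
--             j += 1
--             code = 4 * (alphabet.index(w[i]) + 1)
--         i = j
--
--     return code
-- ===== SOURCE B (Python) =====
-- def bon(w):
--     alphabet = 'abcdefghijklmnopqrstuvwxyz'
--     w = w.lower()
--     code = 0
--     for a, b in zip(w, w[1:]):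
--         if a == b:
--             code = 4 * (alphabet.index(a) + 1)
--     return code
-- ===== Notes on version B (the rewrite author's own statement) =====
-- stated objective: simpler
-- what changed: Replaces the nested while-loop run detection (outer loop jumping i to the end of each run, inner loop re-setting code per repetition) with a single flat pass over adjacent character pairs, setting code whenever a pair is equal.
import Mathlib
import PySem

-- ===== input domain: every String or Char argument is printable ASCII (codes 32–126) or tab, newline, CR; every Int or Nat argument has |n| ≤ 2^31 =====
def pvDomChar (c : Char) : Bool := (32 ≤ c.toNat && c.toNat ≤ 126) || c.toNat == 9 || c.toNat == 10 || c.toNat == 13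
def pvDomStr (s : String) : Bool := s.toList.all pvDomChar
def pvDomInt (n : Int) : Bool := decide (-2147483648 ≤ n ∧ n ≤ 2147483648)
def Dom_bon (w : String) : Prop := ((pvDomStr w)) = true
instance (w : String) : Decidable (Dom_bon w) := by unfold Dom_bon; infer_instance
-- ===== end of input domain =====

-- B replaces A's nested while-loop run detection with one flat pass over adjacent
-- character pairs (simpler decomposition, same O(n) cost).

-- ===== PORT A =====
def pvAlpha : List Char := "abcdefghijklmnopqrstuvwxyz".toList

-- alphabet.index(c); under Pre_bon the index exists (Python raises ValueError where it
-- does not; those inputs are excluded by Pre_bon, so the getD default is never reached)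
def pvIdx (c : Char) : Int := ((PySem.List.index? pvAlpha c).getD 0 : Nat)

-- inner 'while j < len(w) and w[i] == w[j]' loop; c is w[i]; returns final (j, code)
def bonInner (cs : List Char) (c : Char) (j : Nat) (code : Int) : Nat × Int :=
  if j < cs.length ∧ cs.getD j ' ' = c then
    bonInner cs c (j + 1) (4 * (pvIdx c + 1))
  else (j, code)
termination_by cs.length - j
decreasing_by omega

-- needed by bonOuter's termination: the inner loop only moves j forward
theorem bonInner_fst_ge (cs : List Char) (c : Char) (j : Nat) (code : Int) :
    j ≤ (bonInner cs c j code).1 := by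
  fun_induction bonInner with
  | case1 j code h ih => omega
  | case2 => simp

-- outer 'while i < len(w)' loop
def bonOuter (cs : List Char) (i : Nat) (code : Int) : Int :=
  if h : i < cs.length then
    bonOuter cs (bonInner cs (cs.getD i ' ') (i + 1) code).1
               (bonInner cs (cs.getD i ' ') (i + 1) code).2
  else code
termination_by cs.length - i
decreasing_by
  have := bonInner_fst_ge cs (cs.getD i ' ') (i + 1) code
  omega

def bon (w : String) : Int := bonOuter (PySem.Str.lower w).toList 0 0

-- ===== PORT B =====
def pvF (code : Int) (p : Char × Char) : Int :=
  if p.1 = p.2 then 4 * (pvIdx p.1 + 1) else code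

def bon_alt (w : String) : Int :=
  let cs := (PySem.Str.lower w).toList
  (cs.zip cs.tail).foldl pvF 0

-- ===== PRECONDITION & SPEC =====
-- Pre_bon excludes exactly the inputs on which A raises ValueError: a repeated adjacent
-- character (after lower-casing) that is not a lowercase letter.
def Pre_bon (w : String) : Prop :=
  ∀ p ∈ ((PySem.Str.lower w).toList.zip (PySem.Str.lower w).toList.tail),
    p.1 = p.2 → p.1 ∈ pvAlpha
instance (w : String) : Decidable (Pre_bon w) := by unfold Pre_bon; infer_instance

def pvWitness_bon : String := "hello"

def Spec_bon (w : String) (out : Int) : Prop := out = bon_alt w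
instance (w : String) (out : Int) : Decidable (Spec_bon w out) := by unfold Spec_bon; infer_instance

-- ===== CLAIM (what is proved, stated in full; the proofs are below) =====
def Claim_equal_bon : Prop := ∀ (w : String), Dom_bon w → Pre_bon w → Spec_bon w (bon w)

-- ===== LEMMAS AND PROOFS =====

theorem zip_drop_nil (cs : List Char) (k : Nat) (h : cs.length ≤ k + 1) :
    (cs.drop k).zip (cs.drop (k + 1)) = [] := by
  have : cs.drop (k + 1) = [] := List.drop_eq_nil_of_le h
  simp [this]

theorem zip_drop_cons (cs : List Char) (k : Nat) (h : k + 1 < cs.length) :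
    (cs.drop k).zip (cs.drop (k + 1)) =
      (cs.getD k ' ', cs.getD (k + 1) ' ') :: (cs.drop (k + 1)).zip (cs.drop (k + 2)) := by
  have h1 : cs.drop k = cs.getD k ' ' :: cs.drop (k + 1) := by
    rw [List.getD_eq_getElem cs ' ' (by omega)]
    exact List.drop_eq_getElem_cons (by omega)
  have h2 : cs.drop (k + 1) = cs.getD (k + 1) ' ' :: cs.drop (k + 2) := by
    rw [List.getD_eq_getElem cs ' ' h]
    exact List.drop_eq_getElem_cons h
  rw [h1, h2]
  simp [List.zip]

-- the inner run loop consumes exactly the equal adjacent pairs of the current run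
theorem inner_key (cs : List Char) (c : Char) (j : Nat) (code : Int)
    (h1 : 1 ≤ j) (h2 : j ≤ cs.length) (h3 : cs.getD (j - 1) ' ' = c) :
    List.foldl pvF code ((cs.drop (j - 1)).zip (cs.drop j)) =
      List.foldl pvF (bonInner cs c j code).2
        ((cs.drop ((bonInner cs c j code).1 - 1)).zip (cs.drop (bonInner cs c j code).1)) ∧
    (bonInner cs c j code).1 ≤ cs.length ∧
    j ≤ (bonInner cs c j code).1 ∧
    cs.getD ((bonInner cs c j code).1 - 1) ' ' = c ∧
    (cs.length ≤ (bonInner cs c j code).1 ∨ cs.getD (bonInner cs c j code).1 ' ' ≠ c) := by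
  fun_induction bonInner with
  | case1 j code h ih =>
    obtain ⟨hj, hc⟩ := h
    have ih' := ih (by omega) (by omega) (by simpa using hc)
    have hj1 : j - 1 + 1 = j := by omega
    have hz := zip_drop_cons cs (j - 1) (by omega)
    rw [hj1] at hz
    rw [show j - 1 + 2 = j + 1 by omega] at hz
    rw [h3, hc] at hz
    refine ⟨?_, ih'.2.1, by have := ih'.2.2.1; omega, ih'.2.2.2.1, ih'.2.2.2.2⟩
    calc List.foldl pvF code ((cs.drop (j - 1)).zip (cs.drop j))
        = List.foldl pvF (pvF code (c, c)) ((cs.drop j).zip (cs.drop (j + 1))) := by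
          rw [hz]; rfl
      _ = List.foldl pvF (4 * (pvIdx c + 1)) ((cs.drop j).zip (cs.drop (j + 1))) := by
          simp [pvF]
      _ = _ := by simpa using ih'.1
  | case2 j code h =>
    refine ⟨rfl, h2, le_refl j, h3, ?_⟩
    by_cases hl : j < cs.length
    · refine Or.inr ?_
      intro hcon
      exact h ⟨hl, hcon⟩
    · exact Or.inl (by omega)

theorem outer_key (cs : List Char) (i : Nat) (code : Int) :
    bonOuter cs i code = List.foldl pvF code ((cs.drop i).zip (cs.drop (i + 1))) := by
  fun_induction bonOuter with
  | case1 i code h ih =>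
    have hk := inner_key cs (cs.getD i ' ') (i + 1) code (by omega) (by omega) (by simp)
    rw [ih]
    have h1 : List.foldl pvF code ((cs.drop i).zip (cs.drop (i + 1))) =
        List.foldl pvF (bonInner cs (cs.getD i ' ') (i + 1) code).2
          ((cs.drop ((bonInner cs (cs.getD i ' ') (i + 1) code).1 - 1)).zip
            (cs.drop (bonInner cs (cs.getD i ' ') (i + 1) code).1)) := by
      simpa using hk.1
    rw [h1]
    obtain ⟨-, hle, hge, hlast, hstop⟩ := hk
    set r1 := (bonInner cs (cs.getD i ' ') (i + 1) code).1 with hr1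
    rcases hstop with hn | hne
    · have e1 : (cs.drop (r1 - 1)).zip (cs.drop r1) = [] := by
        have hh : cs.length ≤ r1 - 1 + 1 := by omega
        simpa [show r1 - 1 + 1 = r1 by omega] using zip_drop_nil cs (r1 - 1) hh
      have e2 : (cs.drop r1).zip (cs.drop (r1 + 1)) = [] :=
        zip_drop_nil cs r1 (by omega)
      rw [e1, e2]
    · by_cases hlt : r1 < cs.length
      · have hz := zip_drop_cons cs (r1 - 1) (by omega)
        rw [show r1 - 1 + 1 = r1 by omega] at hz
        rw [show r1 - 1 + 2 = r1 + 1 by omega] at hz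
        rw [hz, hlast]
        have hskip : pvF (bonInner cs (cs.getD i ' ') (i + 1) code).2
            (cs.getD i ' ', cs.getD r1 ' ') =
            (bonInner cs (cs.getD i ' ') (i + 1) code).2 := by
          simp only [pvF]
          rw [if_neg]
          intro hcon
          exact hne hcon.symm
        rw [List.foldl_cons, hskip]
      · have e1 : (cs.drop (r1 - 1)).zip (cs.drop r1) = [] := by
          have hh : cs.length ≤ r1 - 1 + 1 := by omega
          simpa [show r1 - 1 + 1 = r1 by omega] using zip_drop_nil cs (r1 - 1) hh
        have e2 : (cs.drop r1).zip (cs.drop (r1 + 1)) = [] :=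
          zip_drop_nil cs r1 (by omega)
        rw [e1, e2]
  | case2 i code h =>
    rw [zip_drop_nil cs i (by omega)]
    rfl

-- ===== VERDICT (by name: the statement is the Claim_ definition above) =====
theorem bon_spec : Claim_equal_bon := by
  intro w _ _
  unfold Spec_bon bon bon_alt
  have := outer_key (PySem.Str.lower w).toList 0 0
  simpa [List.drop_one] using this
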